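-- pv_equiv track=rewrite | github.com/BlessedCow/pharmds | app/cli.py | _parse_domain_selection
-- ===== SOURCE A (Python) =====
-- def _parse_domain_selection(domain_arg: str) -> list[str]:
--     raw = (domain_arg or "all").strip().lower()
--     parts = [p.strip() for p in raw.split(",") if p.strip()]
--     selected: list[str] = []
--
--     def add(x: str) -> None:
--         if x not in selected:
--             selected.append(x)
--
--     for p in parts:
--         if p == "all":
--             add("cyp")
--             add("ugt")
--             add("pgp")
--             add("bcrp")
--             add("oatp")
--             add("pd")
--         elif p == "pk":
--             add("cyp")
--             add("ugt")
--             add("pgp")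
--             add("bcrp")
--             add("oatp")
--         elif p == "pd":
--             add("pd")
--         elif p == "cyp":
--             add("cyp")
--         elif p == "pgp":
--             add("pgp")
--         elif p == "bcrp":
--             add("bcrp")
--         elif p == "oatp":
--             add("oatp")
--         elif p == "ugt":
--             add("ugt")
--         else:
--             raise SystemExit(
--                 "Unknown --domain option. Use: all, pk, pd, cyp, ugt, pgp, bcrp, oatp"
--             )
--
--     if not selected:
--         selected = ["cyp", "ugt", "pgp", "bcrp", "oatp", "pd"]
--
--     return selected
-- ===== SOURCE B (Python) =====
-- _MSG = "Unknown --domain option. Use: all, pk, pd, cyp, ugt, pgp, bcrp, oatp"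
-- _DOMAINS = ["cyp", "ugt", "pgp", "bcrp", "oatp", "pd"]
--
--
-- def _expand(p: str) -> list[str]:
--     if p == "all":
--         return _DOMAINS
--     if p == "pk":
--         return _DOMAINS[:5]
--     if p in _DOMAINS:
--         return [p]
--     raise SystemExit(_MSG)
--
--
-- def _parse_domain_selection(domain_arg: str) -> list[str]:
--     raw = (domain_arg or "all").strip().lower()
--     flat: list[str] = []
--     for piece in raw.split(","):
--         p = piece.strip()
--         if p:
--             flat.extend(_expand(p))
--     if not flat:
--         return list(_DOMAINS)
--     # order the mentioned domains by the position of their first occurrence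
--     order = sorted([(flat.index(d), d) for d in _DOMAINS if d in flat],
--                    key=lambda t: t[0])
--     return [d for _, d in order]
-- ===== Notes on version B (the rewrite author's own statement) =====
-- stated objective: alternative
-- what changed: A dedups incrementally with membership-tested add() calls interleaved in an 8-way elif chain; B instead builds the flat token expansion in one extend loop and reconstructs the selection order by sorting the mentioned canonical domains on the index of their first occurrence in the flat list.
import Mathlib
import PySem

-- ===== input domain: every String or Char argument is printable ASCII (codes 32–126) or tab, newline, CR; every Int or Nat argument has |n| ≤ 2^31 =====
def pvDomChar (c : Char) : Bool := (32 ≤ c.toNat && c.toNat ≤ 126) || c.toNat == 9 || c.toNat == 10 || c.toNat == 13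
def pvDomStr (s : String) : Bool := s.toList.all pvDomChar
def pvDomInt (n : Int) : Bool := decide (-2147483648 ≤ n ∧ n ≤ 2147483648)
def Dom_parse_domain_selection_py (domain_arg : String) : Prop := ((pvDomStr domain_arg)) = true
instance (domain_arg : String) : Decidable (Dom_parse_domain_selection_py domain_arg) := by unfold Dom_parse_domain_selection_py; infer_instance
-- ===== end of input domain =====

-- B drops A's interleaved membership-testing add() dedup entirely: it builds the flat
-- expansion of the tokens and then recovers the selection order by SORTING the mentioned
-- canonical domains on the index of their first occurrence; objective: alternative.

-- ===== PORT A =====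
-- raw = (domain_arg or "all").strip().lower()
def pvRaw (d : String) : String :=
  PySem.Str.lower (PySem.Str.strip (if d = "" then "all" else d))

-- parts = [p.strip() for p in raw.split(",") if p.strip()]
def pvParts (d : String) : List String :=
  ((((PySem.Str.split? (pvRaw d) ",").getD [])).map PySem.Str.strip).filter (· ≠ "")

-- add(x): if x not in selected: selected.append(x)
def pvAdd (sel : List String) (x : String) : List String :=
  if x ∈ sel then sel else sel ++ [x]

-- the body of A's for-loop (the else branch raises SystemExit; excluded by Pre_)
def pvStepA (sel : List String) (p : String) : List String :=
  if p = "all" then pvAdd (pvAdd (pvAdd (pvAdd (pvAdd (pvAdd sel "cyp") "ugt") "pgp") "bcrp") "oatp") "pd"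
  else if p = "pk" then pvAdd (pvAdd (pvAdd (pvAdd (pvAdd sel "cyp") "ugt") "pgp") "bcrp") "oatp"
  else if p = "pd" then pvAdd sel "pd"
  else if p = "cyp" then pvAdd sel "cyp"
  else if p = "pgp" then pvAdd sel "pgp"
  else if p = "bcrp" then pvAdd sel "bcrp"
  else if p = "oatp" then pvAdd sel "oatp"
  else if p = "ugt" then pvAdd sel "ugt"
  else sel  -- raise SystemExit(...)  — unreachable under Pre_

def parse_domain_selection_py (domain_arg : String) : List String :=
  let selected := (pvParts domain_arg).foldl pvStepA []
  if selected = [] then ["cyp", "ugt", "pgp", "bcrp", "oatp", "pd"] else selected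

-- ===== PORT B =====
def pvAll : List String := ["cyp", "ugt", "pgp", "bcrp", "oatp", "pd"]

-- _expand(p); the final branch raises SystemExit — unreachable under Pre_
def pvExpand (p : String) : List String :=
  if p = "all" then pvAll
  else if p = "pk" then PySem.List.slice pvAll none (some 5)   -- _DOMAINS[:5]
  else if p ∈ pvAll then [p]
  else []

-- body of B's for-loop: p = piece.strip(); if p: flat.extend(_expand(p))
def pvStepB (flat : List String) (piece : String) : List String :=
  let p := PySem.Str.strip piece
  if p ≠ "" then flat ++ pvExpand p else flat

-- flat.index(d); guarded by d ∈ flat in B, so the getD default is never used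
def pvIdx (l : List String) (x : String) : Int :=
  (((PySem.List.index? l x).getD 0 : Nat) : Int)

def parse_domain_selection_py_alt (domain_arg : String) : List String :=
  let flat := ((PySem.Str.split? (pvRaw domain_arg) ",").getD []).foldl pvStepB []
  if flat = [] then pvAll
  else
    -- order = sorted([(flat.index(d), d) for d in _DOMAINS if d in flat], key=lambda t: t[0])
    let order := PySem.List.sorted
      ((pvAll.filter (fun x => decide (x ∈ flat))).map (fun x => (pvIdx flat x, x)))
      (fun t => t.1)
    order.map Prod.snd   -- [d for _, d in order]

-- ===== PRECONDITION & SPEC =====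
-- Pre_ excludes exactly the inputs containing an unknown token, on which A raises SystemExit.
def Pre_parse_domain_selection_py (domain_arg : String) : Prop :=
  ∀ p ∈ pvParts domain_arg, p ∈ ["all", "pk", "pd", "cyp", "pgp", "bcrp", "oatp", "ugt"]
instance (domain_arg : String) : Decidable (Pre_parse_domain_selection_py domain_arg) := by
  unfold Pre_parse_domain_selection_py; infer_instance

def pvWitness_parse_domain_selection_py : String := " PK , pd "

def Spec_parse_domain_selection_py (domain_arg : String) (out : List String) : Prop := out = parse_domain_selection_py_alt domain_arg
instance (domain_arg : String) (out : List String) : Decidable (Spec_parse_domain_selection_py domain_arg out) := by unfold Spec_parse_domain_selection_py; infer_instance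

-- ===== CLAIM =====
def Claim_equal_parse_domain_selection_py : Prop := ∀ (domain_arg : String), Dom_parse_domain_selection_py domain_arg → Pre_parse_domain_selection_py domain_arg → Spec_parse_domain_selection_py domain_arg (parse_domain_selection_py domain_arg)

-- ===== LEMMAS AND PROOFS =====

-- every token expansion lies in the canonical six-domain list
theorem expand_subset (p : String) : ∀ x ∈ pvExpand p, x ∈ pvAll := by
  intro x hx
  unfold pvExpand at hx
  split_ifs at hx with h1 h2 h3
  · exact hx
  · have hsl : PySem.List.slice pvAll none (some 5) = ["cyp", "ugt", "pgp", "bcrp", "oatp"] := by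
      decide
    rw [hsl] at hx
    simp only [pvAll, List.mem_cons, List.not_mem_nil, or_false] at hx ⊢
    tauto
  · simp only [List.mem_singleton] at hx
    rw [hx]; exact h3
  · simp at hx

-- A's loop body on a valid token = folding pvAdd over that token's expansion
theorem stepA_eq (p : String)
    (hp : p ∈ ["all", "pk", "pd", "cyp", "pgp", "bcrp", "oatp", "ugt"]) (sel : List String) :
    pvStepA sel p = (pvExpand p).foldl pvAdd sel := by
  fin_cases hp <;> rfl

theorem foldA_eq_flat (parts : List String)
    (h : ∀ p ∈ parts, p ∈ ["all", "pk", "pd", "cyp", "pgp", "bcrp", "oatp", "ugt"]) :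
    ∀ sel, parts.foldl pvStepA sel = (parts.flatMap pvExpand).foldl pvAdd sel := by
  induction parts with
  | nil => intro sel; rfl
  | cons p rest ih =>
    intro sel
    have hp := h p (List.mem_cons_self ..)
    simp only [List.foldl_cons, List.flatMap_cons, List.foldl_append, stepA_eq p hp sel]
    exact ih (fun q hq => h q (List.mem_cons_of_mem _ hq)) _

-- B's loop builds the flat expansion of the nonempty stripped pieces
theorem foldB_eq_flat (pieces : List String) :
    ∀ acc, pieces.foldl pvStepB acc
      = acc ++ ((pieces.map PySem.Str.strip).filter (· ≠ "")).flatMap pvExpand := by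
  induction pieces with
  | nil => intro acc; simp
  | cons q rest ih =>
    intro acc
    by_cases he : PySem.Str.strip q = ""
    · simp only [List.foldl_cons, List.map_cons, List.filter_cons, pvStepB, he]
      simp [ih]
    · simp only [List.foldl_cons, List.map_cons, List.filter_cons, pvStepB]
      simp [ih, he, List.append_assoc]

theorem pvAdd_eq_set_add : pvAdd = PySem.Set.add := by
  funext sel x; simp [pvAdd, PySem.Set.add, PySem.Set.contains]

-- foldl Set.add with an arbitrary accumulator, in terms of dedup
theorem foldl_add_acc (xs : List String) :
    ∀ acc : List String, xs.foldl PySem.Set.add acc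
      = acc ++ (PySem.List.dedup xs).filter (fun y => decide (y ∉ acc)) := by
  induction xs with
  | nil => intro acc; simp [PySem.List.dedup, PySem.Set.ofList]
  | cons x xs ih =>
    intro acc
    have hx : PySem.List.dedup (x :: xs)
        = [x] ++ (PySem.List.dedup xs).filter (fun y => decide (y ∉ ([x] : List String))) := by
      have : PySem.List.dedup (x :: xs) = xs.foldl PySem.Set.add [x] := by
        simp [PySem.List.dedup, PySem.Set.ofList, PySem.Set.add, PySem.Set.contains,
          PySem.Set.empty, List.foldl_cons]
      rw [this, ih]
    rw [List.foldl_cons, ih, hx]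
    by_cases hmem : x ∈ acc
    · have hadd : PySem.Set.add acc x = acc := by
        simp [PySem.Set.add, PySem.Set.contains, hmem]
      rw [hadd]
      simp only [List.filter_append, List.filter_filter]
      have h1 : (List.filter (fun y => decide (y ∉ acc)) [x]) = [] := by simp [hmem]
      rw [h1, List.nil_append]
      congr 1
      apply List.filter_congr
      intro y _
      by_cases h2 : y = x <;> by_cases h3 : y ∈ acc <;> simp [h2, h3, hmem]
    · have hadd : PySem.Set.add acc x = acc ++ [x] := by
        simp [PySem.Set.add, PySem.Set.contains, hmem]
      rw [hadd]
      simp only [List.filter_append, List.filter_filter, List.append_assoc]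
      congr 1
      have h1 : (List.filter (fun y => decide (y ∉ acc)) [x]) = [x] := by simp [hmem]
      rw [h1]
      congr 1
      apply List.filter_congr
      intro y _
      by_cases h2 : y = x <;> by_cases h3 : y ∈ acc <;> simp [h2, h3]

theorem dedup_cons (x : String) (xs : List String) :
    PySem.List.dedup (x :: xs)
      = x :: (PySem.List.dedup xs).filter (fun y => decide (y ≠ x)) := by
  have h : PySem.List.dedup (x :: xs) = (x :: xs).foldl PySem.Set.add [] := by
    simp [PySem.List.dedup, PySem.Set.ofList, PySem.Set.empty]
  rw [h, List.foldl_cons]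
  have hadd : PySem.Set.add ([] : List String) x = [x] := by
    simp [PySem.Set.add, PySem.Set.contains]
  rw [hadd, foldl_add_acc]
  simp

theorem dedup_eq_nil_iff (xs : List String) : PySem.List.dedup xs = [] ↔ xs = [] := by
  cases xs with
  | nil => simp [PySem.List.dedup, PySem.Set.ofList, PySem.Set.empty]
  | cons x xs => rw [dedup_cons]; simp

theorem idx_cons_of_mem_ne {b x : String} (xs : List String) (hb : b ∈ xs) (hne : b ≠ x) :
    pvIdx (x :: xs) b = pvIdx xs b + 1 := by
  obtain ⟨k, hk⟩ := Option.isSome_iff_exists.mp ((PySem.List.index?_isSome_iff xs b).mpr hb)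
  rw [pvIdx, pvIdx, PySem.List.index?_cons_of_ne xs (Ne.symm hne), hk]
  simp

-- dedup lists the members of xs in strictly increasing order of first occurrence
theorem dedup_pairwise_idx (xs : List String) :
    (PySem.List.dedup xs).Pairwise (fun a b => pvIdx xs a < pvIdx xs b) := by
  induction xs with
  | nil => simp [PySem.List.dedup, PySem.Set.ofList, PySem.Set.empty]
  | cons x xs ih =>
    rw [dedup_cons]
    refine List.Pairwise.cons ?_ ?_
    · intro b hb
      have hmem := List.mem_filter.mp hb
      have hbne : b ≠ x := by simpa using hmem.2
      have hbxs : b ∈ xs := (PySem.List.mem_dedup xs b).mp hmem.1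
      rw [idx_cons_of_mem_ne xs hbxs hbne]
      have h0 : pvIdx (x :: xs) x = 0 := by
        rw [pvIdx, PySem.List.index?_cons_self]; rfl
      rw [h0]
      have : (0 : Int) ≤ pvIdx xs b := by simp [pvIdx]
      omega
    · refine List.Pairwise.imp_of_mem ?_ (List.Pairwise.filter _ ih)
      intro a b ha hb hr
      have hma := List.mem_filter.mp ha
      have hmb := List.mem_filter.mp hb
      rw [idx_cons_of_mem_ne xs ((PySem.List.mem_dedup xs a).mp hma.1) (by simpa using hma.2),
          idx_cons_of_mem_ne xs ((PySem.List.mem_dedup xs b).mp hmb.1) (by simpa using hmb.2)]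
      omega

-- the sort-by-first-occurrence-index reconstruction equals ordered dedup
theorem sorted_idx_eq_dedup (flat : List String) (hsub : ∀ x ∈ flat, x ∈ pvAll) :
    (PySem.List.sorted
      ((pvAll.filter (fun x => decide (x ∈ flat))).map (fun x => (pvIdx flat x, x)))
      (fun t => t.1)).map Prod.snd = PySem.List.dedup flat := by
  have hperm : ((PySem.List.dedup flat).map (fun x => (pvIdx flat x, x))).Perm
      ((pvAll.filter (fun x => decide (x ∈ flat))).map (fun x => (pvIdx flat x, x))) := by
    refine List.Perm.map _ ?_
    refine (List.perm_ext_iff_of_nodup (PySem.List.nodup_dedup flat) ?_).mpr ?_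
    · exact List.Nodup.filter _ (by decide)
    · intro a
      simp only [PySem.List.mem_dedup, List.mem_filter, decide_eq_true_eq]
      exact ⟨fun h => ⟨hsub a h, h⟩, fun h => h.2⟩
  have hpw : ((PySem.List.dedup flat).map (fun x => (pvIdx flat x, x))).Pairwise
      (fun a b => a.1 < b.1) := by
    rw [List.pairwise_map]
    exact dedup_pairwise_idx flat
  rw [PySem.List.sorted_eq_of_perm_of_pairwise_lt _ _ _ hperm hpw, List.map_map]
  have hid : (Prod.snd ∘ fun x : String => (pvIdx flat x, x)) = id := rfl
  rw [hid, List.map_id]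

-- ===== VERDICT =====
theorem parse_domain_selection_py_spec : Claim_equal_parse_domain_selection_py := by
  intro d _ hpre
  unfold Spec_parse_domain_selection_py parse_domain_selection_py parse_domain_selection_py_alt
  have hB : (((PySem.Str.split? (pvRaw d) ",").getD [])).foldl pvStepB []
      = (pvParts d).flatMap pvExpand := by
    simpa [pvParts] using foldB_eq_flat _ []
  have hA : (pvParts d).foldl pvStepA []
      = PySem.List.dedup ((pvParts d).flatMap pvExpand) := by
    rw [foldA_eq_flat _ hpre, pvAdd_eq_set_add,
      PySem.List.dedup_eq_ofList, PySem.Set.ofList_eq_foldl]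
  have hsub : ∀ x ∈ (pvParts d).flatMap pvExpand, x ∈ pvAll := by
    intro x hx
    obtain ⟨p, _, hxp⟩ := List.mem_flatMap.mp hx
    exact expand_subset p x hxp
  simp only [hA, hB]
  by_cases hnil : (pvParts d).flatMap pvExpand = []
  · rw [hnil]; rfl
  · rw [if_neg (fun h => hnil ((dedup_eq_nil_iff _).mp h)), if_neg hnil,
      sorted_idx_eq_dedup _ hsub]
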